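-- pv_equiv track=rewrite | github.com/josejoby/programming_questions | python/array_smallest_subarray_with_minmax.py | solve
-- ===== SOURCE A (Python) =====
-- def solve(A):
--     maxx = A[0]
--     minn = A[0]
--     for _ in range(len(A)):
--         if A[_] > maxx:
--             maxx = A[_]
--         elif A[_] < minn:
--             minn = A[_]
--     if minn == maxx: # edge case
--         return 1
--     min_idx = -1
--     max_idx = -1
--     l=len(A)
--     for _ in range(len(A)-1, -1, -1):
--         if A[_] == minn:
--             min_idx = _
--         elif A[_] == maxx:
--             max_idx = _
--         if min_idx > -1 and max_idx > -1:
--             l = min(l, abs(min_idx-max_idx)+1)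
--     return l
-- ===== SOURCE B (Python) =====
-- def solve(A):
--     mn = min(A)
--     mx = max(A)
--     if mn == mx:
--         return 1
--     mins = [i for i, x in enumerate(A) if x == mn]
--     maxs = [i for i, x in enumerate(A) if x == mx]
--     return min(abs(i - j) for i in mins for j in maxs) + 1
-- ===== Notes on version B (the rewrite author's own statement) =====
-- stated objective: alternative
-- what changed: A's backward nearest-occurrence scan is replaced by building the lists of min-indices and max-indices and taking the minimum |i-j| over all cross pairs.
import Mathlib
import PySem

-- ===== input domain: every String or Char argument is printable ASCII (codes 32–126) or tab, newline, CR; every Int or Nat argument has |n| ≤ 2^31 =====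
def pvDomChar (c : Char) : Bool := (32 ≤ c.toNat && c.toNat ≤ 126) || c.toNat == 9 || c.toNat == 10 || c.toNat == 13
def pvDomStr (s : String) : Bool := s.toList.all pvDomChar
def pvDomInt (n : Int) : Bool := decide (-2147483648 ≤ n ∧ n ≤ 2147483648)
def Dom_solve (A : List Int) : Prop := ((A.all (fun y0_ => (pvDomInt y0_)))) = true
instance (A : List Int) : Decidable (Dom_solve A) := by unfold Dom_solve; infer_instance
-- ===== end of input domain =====

-- B replaces A's backward nearest-occurrence scan by the min |i-j| over all (min-index, max-index) pairs.

-- ===== PORT A =====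
def solve (A : List Int) : Int :=
  let a0 := PySem.List.pyGetD A 0 0
  let mm := (PySem.List.pyRange 0 (A.length : Int) 1).foldl
      (fun (s : Int × Int) i =>
        let x := PySem.List.pyGetD A i 0
        if x > s.1 then (x, s.2) else if x < s.2 then (s.1, x) else s)
      (a0, a0)
  if mm.2 = mm.1 then 1
  else
    let n : Int := (A.length : Int)
    let st := (PySem.List.pyRange (n - 1) (-1) (-1)).foldl
      (fun (s : Int × Int × Int) i =>
        let x := PySem.List.pyGetD A i 0
        let p := if x = mm.2 then (i, s.2.1) else if x = mm.1 then (s.1, i) else (s.1, s.2.1)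
        let l := if p.1 > -1 ∧ p.2 > -1 then min s.2.2 (|p.1 - p.2| + 1) else s.2.2
        (p.1, p.2, l))
      (-1, -1, n)
    st.2.2

-- ===== PORT B =====
def solve_alt (A : List Int) : Int :=
  let mn := (PySem.List.min? A (fun x => x)).getD 0
  let mx := (PySem.List.max? A (fun x => x)).getD 0
  if mn = mx then 1
  else
    let mins := ((PySem.List.enumerate A 0).filter (fun p => p.2 == mn)).map (fun p => p.1)
    let maxs := ((PySem.List.enumerate A 0).filter (fun p => p.2 == mx)).map (fun p => p.1)
    let ds := mins.flatMap (fun i => maxs.map (fun j => |i - j|))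
    (PySem.List.min? ds (fun x => x)).getD 0 + 1

-- ===== PRECONDITION & SPEC =====
-- Pre_ excludes the empty list, on which Python A raises IndexError (A[0]).
def Pre_solve (A : List Int) : Prop := A ≠ []
instance (A : List Int) : Decidable (Pre_solve A) := by unfold Pre_solve; infer_instance
def pvWitness_solve : List Int := [3, 1, 2, 3, 1]

def Spec_solve (A : List Int) (out : Int) : Prop := out = solve_alt A
instance (A : List Int) (out : Int) : Decidable (Spec_solve A out) := by unfold Spec_solve; infer_instance

-- ===== CLAIM (what is proved, stated in full; the proofs are below) =====
def Claim_equal_solve : Prop := ∀ (A : List Int), Dom_solve A → Pre_solve A → Spec_solve A (solve A)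

-- ===== LEMMAS AND PROOFS =====

def vmin : List Int → Option Int
  | [] => none
  | a :: t => some (t.foldl min a)

theorem vmin_le {l : List Int} {m : Int} (h : vmin l = some m) : m ∈ l ∧ ∀ y ∈ l, m ≤ y := by
  cases l with
  | nil => simp [vmin] at h
  | cons a t =>
    simp only [vmin, Option.some.injEq] at h
    subst h
    refine ⟨?_, ?_⟩
    · rcases PySem.List.foldl_min_mem t a with h | h
      · simp [h]
      · exact List.mem_cons_of_mem _ h
    · intro y hy
      rcases List.mem_cons.1 hy with rfl | hy
      · exact (PySem.List.foldl_min_le t y).1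
      · exact (PySem.List.foldl_min_le t a).2 y hy

theorem vmin_spec {l : List Int} {a : Int} (hmem : a ∈ l) (hle : ∀ y ∈ l, a ≤ y) :
    vmin l = some a := by
  cases l with
  | nil => simp at hmem
  | cons b t =>
    have h := vmin_le (l := b :: t) (m := t.foldl min b) rfl
    have h1 : t.foldl min b ≤ a := h.2 a hmem
    have h2 : a ≤ t.foldl min b := hle _ h.1
    simp [vmin, le_antisymm h1 h2]

theorem minq (l : List Int) : PySem.List.min? l (fun x => x) = vmin l := by
  cases l with
  | nil => simp [PySem.List.min?, vmin]
  | cons a t => simpa [vmin] using PySem.List.min?_id_cons (x := a) (t := t)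

def idxs (A : List Int) (v : Int) (k : Nat) : List Int :=
  (PySem.List.pyRange (k : Int) (A.length : Int) 1).filter (fun j => PySem.List.pyGetD A j 0 == v)

def fi (A : List Int) (v : Int) (k : Nat) : Int := (idxs A v k).headD (-1)

def dists (A : List Int) (mn mx : Int) (k : Nat) : List Int :=
  (idxs A mn k).flatMap (fun i => (idxs A mx k).map (fun j => |i - j|))

def Lk (A : List Int) (mn mx : Int) (k : Nat) : Int :=
  min (A.length : Int) ((vmin (dists A mn mx k)).getD ((A.length : Int) - 1) + 1)

theorem mem_idxs {A : List Int} {v : Int} {k : Nat} {j : Int} :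
    j ∈ idxs A v k ↔ ((k : Int) ≤ j ∧ j < (A.length : Int)) ∧ PySem.List.pyGetD A j 0 = v := by
  simp [idxs, List.mem_filter, PySem.List.mem_pyRange_one, and_assoc]

theorem idxs_pairwise (A : List Int) (v : Int) (k : Nat) : (idxs A v k).Pairwise (· < ·) :=
  (PySem.List.pairwise_lt_pyRange_one _ _).filter _

theorem head_least {l : List Int} (hp : l.Pairwise (· < ·)) : ∀ j ∈ l, l.headD (-1) ≤ j := by
  cases l with
  | nil => simp
  | cons a t =>
    intro j hj
    rcases List.mem_cons.1 hj with rfl | hj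
    · simp
    · exact le_of_lt (by simpa using (List.pairwise_cons.1 hp).1 j hj)

theorem fi_le {A : List Int} {v : Int} {k : Nat} : ∀ j ∈ idxs A v k, fi A v k ≤ j :=
  head_least (idxs_pairwise A v k)

theorem fi_mem {A : List Int} {v : Int} {k : Nat} (h : idxs A v k ≠ []) : fi A v k ∈ idxs A v k := by
  unfold fi
  cases hl : idxs A v k with
  | nil => exact absurd hl h
  | cons a t => simp

theorem fi_nil {A : List Int} {v : Int} {k : Nat} (h : idxs A v k = []) : fi A v k = -1 := by
  simp [fi, h]

theorem mem_dists {A : List Int} {mn mx : Int} {k : Nat} {d : Int} :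
    d ∈ dists A mn mx k ↔ ∃ i ∈ idxs A mn k, ∃ j ∈ idxs A mx k, d = |i - j| := by
  simp [dists, List.mem_flatMap, List.mem_map, eq_comm]

-- unfolding one index: idxs at k for k < len
theorem idxs_cons {A : List Int} {v : Int} {k : Nat} (hk : k < A.length) :
    idxs A v k = if PySem.List.pyGetD A (k : Int) 0 = v then (k : Int) :: idxs A v (k + 1)
                 else idxs A v (k + 1) := by
  unfold idxs
  rw [PySem.List.pyRange_one_cons (by exact_mod_cast hk)]
  have : ((k : Int) + 1) = ((k + 1 : Nat) : Int) := by push_cast; ring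
  rw [List.filter_cons, this]
  split_ifs with h1 h2 h3 <;> simp_all

theorem idxs_nil_self (A : List Int) (v : Int) : idxs A v A.length = [] := by
  unfold idxs
  rw [PySem.List.pyRange_one_eq_nil le_rfl]
  rfl

def f2 (A : List Int) (mn mx : Int) (s : Int × Int × Int) (i : Int) : Int × Int × Int :=
  let x := PySem.List.pyGetD A i 0
  let p := if x = mn then (i, s.2.1) else if x = mx then (s.1, i) else (s.1, s.2.1)
  let l := if p.1 > -1 ∧ p.2 > -1 then min s.2.2 (|p.1 - p.2| + 1) else s.2.2
  (p.1, p.2, l)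

-- distances only between valid indices are in [0, n-1]
theorem dists_bound {A : List Int} {mn mx : Int} {k : Nat} {d : Int}
    (h : d ∈ dists A mn mx k) : 0 ≤ d ∧ d ≤ (A.length : Int) - 1 := by
  rcases mem_dists.1 h with ⟨i, hi, j, hj, rfl⟩
  have hi' := mem_idxs.1 hi
  have hj' := mem_idxs.1 hj
  have hk : (0 : Int) ≤ (k : Int) := by positivity
  constructor
  · exact abs_nonneg _
  · rcases le_total i j with h' | h'
    · rw [abs_of_nonpos (by omega)]; omega
    · rw [abs_of_nonneg (by omega)]; omega

theorem step_inv {A : List Int} {mn mx : Int} (hne : mn ≠ mx) {k : Nat} (hk : k < A.length) :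
    f2 A mn mx (fi A mn (k + 1), fi A mx (k + 1), Lk A mn mx (k + 1)) (k : Int)
      = (fi A mn k, fi A mx k, Lk A mn mx k) := by
  have hk0 : (0 : Int) ≤ (k : Int) := by positivity
  by_cases hx : PySem.List.pyGetD A (k : Int) 0 = mn
  · -- the element at k is the minimum value
    have hImn : idxs A mn k = (k : Int) :: idxs A mn (k + 1) := by
      rw [idxs_cons hk]; simp [hx]
    have hImx : idxs A mx k = idxs A mx (k + 1) := by
      rw [idxs_cons hk]; simp [hx, hne]
    have hfin : fi A mn k = (k : Int) := by simp [fi, hImn]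
    have hfax : fi A mx k = fi A mx (k + 1) := by simp [fi, hImx]
    by_cases hJ : idxs A mx (k + 1) = []
    · have hfx : fi A mx (k + 1) = -1 := fi_nil hJ
      have hdists : dists A mn mx k = dists A mn mx (k + 1) := by
        unfold dists; rw [hImn, hImx, List.flatMap_cons, hJ]; simp
      have hLk : Lk A mn mx k = Lk A mn mx (k + 1) := by unfold Lk; rw [hdists]
      simp [f2, hx, hfx, hfin, hfax, hLk]
    · set j0 := fi A mx (k + 1) with hj0def
      have hj0mem : j0 ∈ idxs A mx (k + 1) := fi_mem hJ
      have hj0 : (k : Int) + 1 ≤ j0 := by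
        have := (mem_idxs.1 hj0mem).1.1; push_cast at this ⊢; omega
      have habs : |(k : Int) - j0| = j0 - (k : Int) := by rw [abs_of_nonpos (by omega)]; ring
      -- the candidate minimum of dists k
      have hmain : Lk A mn mx k = min (Lk A mn mx (k + 1)) (j0 - (k : Int) + 1) := by
        have hkmem : (k : Int) ∈ idxs A mn k := by rw [hImn]; exact List.mem_cons_self
        have hj0mem' : j0 ∈ idxs A mx k := by rw [hImx]; exact hj0mem
        cases hvd : vmin (dists A mn mx (k + 1)) with
        | none =>
          have hnil : dists A mn mx (k + 1) = [] := by
            cases h : dists A mn mx (k + 1) with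
            | nil => rfl
            | cons a t => rw [h] at hvd; simp [vmin] at hvd
          have hv : vmin (dists A mn mx k) = some (j0 - (k : Int)) := by
            apply vmin_spec
            · rw [← habs]; exact mem_dists.2 ⟨_, hkmem, _, hj0mem', rfl⟩
            · intro y hy
              rcases mem_dists.1 hy with ⟨i, hi, j, hj, rfl⟩
              rw [hImn] at hi
              rcases List.mem_cons.1 hi with rfl | hi
              · have hjge : j0 ≤ j := fi_le j (hImx ▸ hj)
                have hj1 : (k : Int) + 1 ≤ j := le_trans hj0 hjge
                rw [abs_of_nonpos (by omega)]; omega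
              · exfalso
                have : |i - j| ∈ dists A mn mx (k + 1) :=
                  mem_dists.2 ⟨_, hi, _, hImx ▸ hj, rfl⟩
                rw [hnil] at this; simp at this
          unfold Lk; rw [hv, hvd]
          simp only [Option.getD_some, Option.getD_none]
          have := (mem_idxs.1 hj0mem).1.2
          omega
        | some d =>
          obtain ⟨hdmem, hdle⟩ := vmin_le hvd
          have hv : vmin (dists A mn mx k) = some (min d (j0 - (k : Int))) := by
            apply vmin_spec
            · rcases le_total d (j0 - (k : Int)) with hc | hc
              · rw [min_eq_left hc]
                rcases mem_dists.1 hdmem with ⟨i, hi, j, hj, rfl⟩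
                exact mem_dists.2 ⟨_, hImn ▸ List.mem_cons_of_mem _ hi, _, hImx ▸ hj, rfl⟩
              · rw [min_eq_right hc, ← habs]
                exact mem_dists.2 ⟨_, hkmem, _, hj0mem', rfl⟩
            · intro y hy
              rcases mem_dists.1 hy with ⟨i, hi, j, hj, rfl⟩
              rw [hImn] at hi
              rcases List.mem_cons.1 hi with rfl | hi
              · have hjge : j0 ≤ j := fi_le j (hImx ▸ hj)
                have hj1 : (k : Int) + 1 ≤ j := le_trans hj0 hjge
                rw [abs_of_nonpos (by omega)]; omega
              · have : d ≤ |i - j| := hdle _ (mem_dists.2 ⟨_, hi, _, hImx ▸ hj, rfl⟩)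
                omega
          unfold Lk; rw [hv, hvd]
          simp only [Option.getD_some]
          omega
      simp [f2, hx, hfin, hfax, hmain, habs, show ((k : Int) > -1 ∧ j0 > -1) by omega]
  · by_cases hx2 : PySem.List.pyGetD A (k : Int) 0 = mx
    · -- the element at k is the maximum value
      have hx' : ¬ (A[k]?.getD 0 = mn) := by simpa using hx
      have hx2' : A[k]?.getD 0 = mx := by simpa using hx2
      have hImn : idxs A mn k = idxs A mn (k + 1) := by
        rw [idxs_cons hk]; simp [hx']
      have hImx : idxs A mx k = (k : Int) :: idxs A mx (k + 1) := by
        rw [idxs_cons hk]; simp [hx2']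
      have hfin : fi A mn k = fi A mn (k + 1) := by simp [fi, hImn]
      have hfax : fi A mx k = (k : Int) := by simp [fi, hImx]
      by_cases hI : idxs A mn (k + 1) = []
      · have hfn : fi A mn (k + 1) = -1 := fi_nil hI
        have hdists : dists A mn mx k = dists A mn mx (k + 1) := by
          unfold dists; rw [hImn, hI]; simp
        have hLk : Lk A mn mx k = Lk A mn mx (k + 1) := by unfold Lk; rw [hdists]
        simp only [f2]
        rw [if_neg hx, if_pos hx2]
        dsimp only
        rw [hfn, if_neg (by omega : ¬((-1:Int) > -1 ∧ (k:Int) > -1)), hfin, hfn, hfax, hLk]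
      · set i0 := fi A mn (k + 1) with hi0def
        have hi0mem : i0 ∈ idxs A mn (k + 1) := fi_mem hI
        have hi0 : (k : Int) + 1 ≤ i0 := by
          have := (mem_idxs.1 hi0mem).1.1; push_cast at this ⊢; omega
        have habs : |i0 - (k : Int)| = i0 - (k : Int) := abs_of_nonneg (by omega)
        have hmain : Lk A mn mx k = min (Lk A mn mx (k + 1)) (i0 - (k : Int) + 1) := by
          have hkmem : (k : Int) ∈ idxs A mx k := by rw [hImx]; exact List.mem_cons_self
          have hi0mem' : i0 ∈ idxs A mn k := by rw [hImn]; exact hi0mem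
          cases hvd : vmin (dists A mn mx (k + 1)) with
          | none =>
            have hnil : dists A mn mx (k + 1) = [] := by
              cases h : dists A mn mx (k + 1) with
              | nil => rfl
              | cons a t => rw [h] at hvd; simp [vmin] at hvd
            have hv : vmin (dists A mn mx k) = some (i0 - (k : Int)) := by
              apply vmin_spec
              · rw [← habs]; exact mem_dists.2 ⟨_, hi0mem', _, hkmem, rfl⟩
              · intro y hy
                rcases mem_dists.1 hy with ⟨i, hi', j, hj, rfl⟩
                rw [hImx] at hj
                rcases List.mem_cons.1 hj with rfl | hj
                · have hige : i0 ≤ i := fi_le i (hImn ▸ hi')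
                  rw [abs_of_nonneg (by omega)]; omega
                · exfalso
                  have : |i - j| ∈ dists A mn mx (k + 1) :=
                    mem_dists.2 ⟨_, hImn ▸ hi', _, hj, rfl⟩
                  rw [hnil] at this; simp at this
            unfold Lk; rw [hv, hvd]
            simp only [Option.getD_some, Option.getD_none]
            have := (mem_idxs.1 hi0mem).1.2
            omega
          | some d =>
            obtain ⟨hdmem, hdle⟩ := vmin_le hvd
            have hv : vmin (dists A mn mx k) = some (min d (i0 - (k : Int))) := by
              apply vmin_spec
              · rcases le_total d (i0 - (k : Int)) with hc | hc
                · rw [min_eq_left hc]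
                  rcases mem_dists.1 hdmem with ⟨i, hi', j, hj, rfl⟩
                  exact mem_dists.2 ⟨_, hImn ▸ hi', _, hImx ▸ List.mem_cons_of_mem _ hj, rfl⟩
                · rw [min_eq_right hc, ← habs]
                  exact mem_dists.2 ⟨_, hi0mem', _, hkmem, rfl⟩
              · intro y hy
                rcases mem_dists.1 hy with ⟨i, hi', j, hj, rfl⟩
                rw [hImx] at hj
                rcases List.mem_cons.1 hj with rfl | hj
                · have hige : i0 ≤ i := fi_le i (hImn ▸ hi')
                  rw [abs_of_nonneg (by omega)]; omega
                · have : d ≤ |i - j| := hdle _ (mem_dists.2 ⟨_, hImn ▸ hi', _, hj, rfl⟩)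
                  omega
            unfold Lk; rw [hv, hvd]
            simp only [Option.getD_some]
            omega
        simp only [f2]
        rw [if_neg hx, if_pos hx2]
        dsimp only
        rw [if_pos (show i0 > -1 ∧ (k:Int) > -1 by omega), habs, hfin, hfax, hmain]
    · -- the element at k is neither the minimum nor the maximum value
      have hx' : ¬ (A[k]?.getD 0 = mn) := by simpa using hx
      have hx2' : ¬ (A[k]?.getD 0 = mx) := by simpa using hx2
      have hImn : idxs A mn k = idxs A mn (k + 1) := by
        rw [idxs_cons hk]; simp [hx']
      have hImx : idxs A mx k = idxs A mx (k + 1) := by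
        rw [idxs_cons hk]; simp [hx2']
      have hfin : fi A mn k = fi A mn (k + 1) := by simp [fi, hImn]
      have hfax : fi A mx k = fi A mx (k + 1) := by simp [fi, hImx]
      have hdists : dists A mn mx k = dists A mn mx (k + 1) := by
        unfold dists; rw [hImn, hImx]
      have hLk : Lk A mn mx k = Lk A mn mx (k + 1) := by unfold Lk; rw [hdists]
      simp only [f2]
      rw [if_neg hx, if_neg hx2]
      dsimp only
      by_cases hc : fi A mn (k + 1) > -1 ∧ fi A mx (k + 1) > -1
      · have hI : idxs A mn (k + 1) ≠ [] := by
          intro h; rw [fi_nil h] at hc; omega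
        have hJ : idxs A mx (k + 1) ≠ [] := by
          intro h; rw [fi_nil h] at hc; omega
        have hpair : |fi A mn (k + 1) - fi A mx (k + 1)| ∈ dists A mn mx (k + 1) :=
          mem_dists.2 ⟨_, fi_mem hI, _, fi_mem hJ, rfl⟩
        have hnn : dists A mn mx (k + 1) ≠ [] := by
          intro h; rw [h] at hpair; simp at hpair
        obtain ⟨a, t, hat⟩ := List.exists_cons_of_ne_nil hnn
        have hvd : vmin (dists A mn mx (k + 1)) = some (t.foldl min a) := by rw [hat]; rfl
        obtain ⟨hdmem, hdle⟩ := vmin_le hvd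
        have hle : t.foldl min a ≤ |fi A mn (k + 1) - fi A mx (k + 1)| := hdle _ hpair
        have hmin : min (Lk A mn mx (k + 1)) (|fi A mn (k + 1) - fi A mx (k + 1)| + 1)
            = Lk A mn mx (k + 1) := by
          unfold Lk; rw [hvd]; simp only [Option.getD_some]; omega
        rw [if_pos hc, hmin, hfin, hfax, hLk]
      · rw [if_neg hc, hfin, hfax, hLk]

theorem loop2_inv {A : List Int} {mn mx : Int} (hne : mn ≠ mx) :
    ∀ k : Nat, k ≤ A.length →
      (PySem.List.pyRange ((k : Int) - 1) (-1) (-1)).foldl (f2 A mn mx)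
          (fi A mn k, fi A mx k, Lk A mn mx k)
        = (fi A mn 0, fi A mx 0, Lk A mn mx 0) := by
  intro k
  induction k with
  | zero =>
    intro _
    rw [PySem.List.pyRange_neg_one_eq_nil (by omega)]
    rfl
  | succ k ih =>
    intro hk
    have hcast : ((k + 1 : Nat) : Int) - 1 = (k : Int) := by push_cast; ring
    rw [hcast, PySem.List.pyRange_neg_one_cons (by omega), List.foldl_cons,
      step_inv hne (by omega)]
    exact ih (by omega)

theorem loop2_eq {A : List Int} {mn mx : Int} (hne : mn ≠ mx) :
    (PySem.List.pyRange ((A.length : Int) - 1) (-1) (-1)).foldl (f2 A mn mx)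
        (-1, -1, (A.length : Int))
      = (fi A mn 0, fi A mx 0, Lk A mn mx 0) := by
  have h1 : fi A mn A.length = -1 := fi_nil (idxs_nil_self A mn)
  have h2 : fi A mx A.length = -1 := fi_nil (idxs_nil_self A mx)
  have h3 : Lk A mn mx A.length = (A.length : Int) := by
    have : dists A mn mx A.length = [] := by
      unfold dists; rw [idxs_nil_self A mn]; rfl
    unfold Lk; rw [this]
    simp [vmin]
  have := loop2_inv hne A.length le_rfl
  rw [h1, h2, h3] at this
  exact this

-- loop 1: the running min/max loop computes foldl max / foldl min
theorem minmax_fold (t : List Int) : ∀ M m : Int, m ≤ M →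
    t.foldl (fun (s : Int × Int) x => if x > s.1 then (x, s.2) else if x < s.2 then (s.1, x) else s)
        (M, m)
      = (t.foldl max M, t.foldl min m) := by
  induction t with
  | nil => intro M m _; rfl
  | cons x t ih =>
    intro M m hmM
    simp only [List.foldl_cons]
    by_cases h1 : x > M
    · rw [if_pos h1, ih x m (by omega)]
      congr 1
      · congr 1; omega
      · congr 1; omega
    · rw [if_neg h1]
      by_cases h2 : x < m
      · rw [if_pos h2, ih M x (by omega)]
        congr 1
        · congr 1; omega
        · congr 1; omega
      · rw [if_neg h2, ih M m hmM]
        congr 1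
        · congr 1; omega
        · congr 1; omega

-- assembly lemmas
theorem mins_eq (A : List Int) (v : Int) :
    ((PySem.List.enumerate A 0).filter (fun p => p.2 == v)).map (fun p => p.1) = idxs A v 0 := by
  rw [PySem.List.enumerate_eq_map_pyRange (d := 0)]
  rw [List.filter_map, List.map_map]
  unfold idxs
  simp [Function.comp_def]

theorem idxs_ne_nil_of_mem {A : List Int} {v : Int} (h : v ∈ A) : idxs A v 0 ≠ [] := by
  obtain ⟨i, hi, hgi⟩ := List.mem_iff_getElem.1 h
  have : (i : Int) ∈ idxs A v 0 := by
    refine mem_idxs.2 ⟨⟨by positivity, by exact_mod_cast hi⟩, ?_⟩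
    rw [PySem.List.pyGetD_natCast, List.getD_eq_getElem?_getD, List.getElem?_eq_getElem hi]
    simpa using hgi
  intro hnil
  rw [hnil] at this
  simp at this

theorem solve_cons (a : Int) (t : List Int) :
    solve (a :: t) =
      (if t.foldl min a = t.foldl max a then 1
       else ((PySem.List.pyRange (((a :: t).length : Int) - 1) (-1) (-1)).foldl
               (f2 (a :: t) (t.foldl min a) (t.foldl max a))
               (-1, -1, ((a :: t).length : Int))).2.2) := by
  simp only [solve]
  rw [PySem.List.pyGetD_zero_cons]
  rw [PySem.List.foldl_pyRange_zero_pyGetD' (a :: t) 0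
        (fun (s : Int × Int) x => if x > s.1 then (x, s.2) else if x < s.2 then (s.1, x) else s)
        (a, a)]
  rw [List.foldl_cons]
  have hstep : (if a > a then ((a : Int), (a : Int)) else if a < a then (a, a) else ((a : Int), a)) = (a, a) := by
    simp
  rw [hstep, minmax_fold t a a le_rfl]
  rfl

theorem solve_alt_cons (a : Int) (t : List Int) :
    solve_alt (a :: t) =
      (if t.foldl min a = t.foldl max a then 1
       else (vmin (dists (a :: t) (t.foldl min a) (t.foldl max a) 0)).getD 0 + 1) := by
  simp only [solve_alt]
  rw [PySem.List.min?_id_cons, PySem.List.max?_id_cons]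
  simp only [Option.getD_some]
  by_cases h : t.foldl min a = t.foldl max a
  · rw [if_pos h, if_pos h]
  · rw [if_neg h, if_neg h]
    rw [mins_eq, mins_eq, minq]
    rfl

-- ===== VERDICT (by name: the statement is the Claim_ definition above) =====
theorem solve_spec : Claim_equal_solve := by
  intro A _ hpre
  unfold Spec_solve
  obtain ⟨a, t, rfl⟩ := List.exists_cons_of_ne_nil hpre
  rw [solve_cons, solve_alt_cons]
  by_cases h : t.foldl min a = t.foldl max a
  · rw [if_pos h, if_pos h]
  · rw [if_neg h, if_neg h]
    rw [loop2_eq h]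
    -- final: Lk at 0 is the min distance + 1
    have hmnmem : t.foldl min a ∈ (a :: t) := by
      rcases PySem.List.foldl_min_mem t a with h' | h'
      · rw [h']; exact List.mem_cons_self
      · exact List.mem_cons_of_mem _ h'
    have hmxmem : t.foldl max a ∈ (a :: t) := by
      rcases PySem.List.foldl_max_mem t a with h' | h'
      · rw [h']; exact List.mem_cons_self
      · exact List.mem_cons_of_mem _ h'
    have hI := idxs_ne_nil_of_mem hmnmem
    have hJ := idxs_ne_nil_of_mem hmxmem
    have hpair : |fi (a :: t) (t.foldl min a) 0 - fi (a :: t) (t.foldl max a) 0|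
        ∈ dists (a :: t) (t.foldl min a) (t.foldl max a) 0 :=
      mem_dists.2 ⟨_, fi_mem hI, _, fi_mem hJ, rfl⟩
    have hnn : dists (a :: t) (t.foldl min a) (t.foldl max a) 0 ≠ [] := by
      intro h'; rw [h'] at hpair; simp at hpair
    obtain ⟨b, u, hbu⟩ := List.exists_cons_of_ne_nil hnn
    have hvd : vmin (dists (a :: t) (t.foldl min a) (t.foldl max a) 0) = some (u.foldl min b) := by
      rw [hbu]; rfl
    obtain ⟨hdmem, _⟩ := vmin_le hvd
    have hb := dists_bound hdmem
    show (Lk (a :: t) (t.foldl min a) (t.foldl max a) 0) = _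
    unfold Lk
    rw [hvd]
    simp only [Option.getD_some]
    omega
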